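-- pv_equiv track=rewrite | github.com/Rehan719/Workstation | agentic_core/governance/grn_modeler.py | infer_topology
-- ===== SOURCE A (Python) =====
-- from typing import Dict, Any, List
--
-- def infer_topology(interaction_logs: List[Dict[str, Any]]) -> Dict[str, List[str]]:
--     """
--     Reconstructs GRN topology from system activity logs using correlation analysis.
--     """
--     topology = {}
--     # Article 60: Reconstruct from logs instead of returning hardcoded mock
--     for log in interaction_logs:
--         caller = log.get('caller')
--         callee = log.get('callee')
--         if caller and callee:
--             if caller not in topology: topology[caller] = []
--             if callee not in topology[caller]:
--                 topology[caller].append(callee)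
--
--     return topology if topology else {"orchestrator": ["manager", "dispatcher"]}
-- ===== SOURCE B (Python) =====
-- from typing import Dict, Any, List
--
-- def infer_topology(interaction_logs: List[Dict[str, Any]]) -> Dict[str, List[str]]:
--     # Flatten the logs into a list of valid (caller, callee) edges.
--     edges = []
--     for log in interaction_logs:
--         caller = log.get('caller')
--         callee = log.get('callee')
--         if caller and callee:
--             edges.append((caller, callee))
--     # Distinct callers in first-occurrence order; then one scan of the edge
--     # list per caller collects its callees, deduped in first-occurrence order.
--     callers = list(dict.fromkeys(c for c, _ in edges))
--     topology = {c: list(dict.fromkeys(e for cc, e in edges if cc == c))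
--                 for c in callers}
--     return topology if topology else {"orchestrator": ["manager", "dispatcher"]}
-- ===== Notes on version B (the rewrite author's own statement) =====
-- stated objective: alternative
-- what changed: A makes a single pass mutating a dict with inline membership dedup; B first flattens the logs to a valid-edge list, then computes the distinct callers and, for each caller, re-scans the edge list (a filter per caller) to collect its deduped callees - grouping by repeated per-key scans instead of incremental dict mutation.
import Mathlib
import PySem

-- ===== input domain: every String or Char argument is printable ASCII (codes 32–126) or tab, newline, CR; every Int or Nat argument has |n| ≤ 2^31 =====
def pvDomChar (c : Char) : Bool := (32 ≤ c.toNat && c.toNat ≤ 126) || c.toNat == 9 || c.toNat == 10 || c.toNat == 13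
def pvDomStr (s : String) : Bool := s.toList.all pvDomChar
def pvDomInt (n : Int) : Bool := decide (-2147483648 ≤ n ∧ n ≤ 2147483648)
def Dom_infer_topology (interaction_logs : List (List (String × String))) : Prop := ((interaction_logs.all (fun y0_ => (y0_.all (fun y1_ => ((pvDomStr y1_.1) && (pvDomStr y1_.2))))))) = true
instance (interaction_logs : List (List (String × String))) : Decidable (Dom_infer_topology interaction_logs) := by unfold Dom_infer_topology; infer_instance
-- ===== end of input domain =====

-- B flattens the logs to a valid-edge list and rebuilds the topology by per-caller scans of
-- that list, instead of A's single dict-mutating pass with inline dedup; return value only.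
-- ===== PORT A =====
def infer_topology_step (topology : PySem.Dict String (List String)) (log : List (String × String)) : PySem.Dict String (List String) :=
  let caller := (PySem.Dict.ofList log).get? "caller"
  let callee := (PySem.Dict.ofList log).get? "callee"
  match caller, callee with
  | some c, some e =>
    if c ≠ "" && e ≠ "" then
      let topology := if topology.contains c then topology else topology.insert c []
      if e ∈ topology.getD c [] then topology else topology.modify c [] (· ++ [e])
    else topology
  | _, _ => topology

def infer_topology (interaction_logs : List (List (String × String))) : List (String × List String) :=
  let topology := interaction_logs.foldl infer_topology_step PySem.Dict.empty
  if topology.items.isEmpty then [("orchestrator", ["manager", "dispatcher"])] else topology.items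

-- ===== PORT B =====
-- the valid (caller, callee) edge of one log entry, if any
def pvEdge? (log : List (String × String)) : Option (String × String) :=
  match (PySem.Dict.ofList log).get? "caller", (PySem.Dict.ofList log).get? "callee" with
  | some c, some e => if c ≠ "" && e ≠ "" then some (c, e) else none
  | _, _ => none

def infer_topology_alt (interaction_logs : List (List (String × String))) : List (String × List String) :=
  let edges := interaction_logs.filterMap pvEdge?
  let callers := PySem.List.dedup (edges.map Prod.fst)
  let topology := callers.map (fun c => (c, PySem.List.dedup ((edges.filter (fun p => p.1 == c)).map Prod.snd)))
  if topology.isEmpty then [("orchestrator", ["manager", "dispatcher"])] else topology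

-- ===== PRECONDITION & SPEC =====
def Spec_infer_topology (interaction_logs : List (List (String × String))) (out : List (String × List String)) : Prop := out = infer_topology_alt interaction_logs
instance (interaction_logs : List (List (String × String))) (out : List (String × List String)) : Decidable (Spec_infer_topology interaction_logs out) := by unfold Spec_infer_topology; infer_instance

-- ===== CLAIM =====
def Claim_equal_infer_topology : Prop := ∀ (interaction_logs : List (List (String × String))), Dom_infer_topology interaction_logs → Spec_infer_topology interaction_logs (infer_topology interaction_logs)

-- ===== LEMMAS AND PROOFS =====

-- A's inner update for one valid edge (c, e)
def pvEdgeStep (t : PySem.Dict String (List String)) (c e : String) : PySem.Dict String (List String) :=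
  let t := if t.contains c then t else t.insert c []
  if e ∈ t.getD c [] then t else t.modify c [] (· ++ [e])

-- specF es: the topology B computes from an edge list es
def pvG (es : List (String × String)) (c : String) : List String :=
  PySem.List.dedup ((es.filter (fun p => p.1 == c)).map Prod.snd)

def pvSpecF (es : List (String × String)) : List (String × List String) :=
  (PySem.List.dedup (es.map Prod.fst)).map (fun c => (c, pvG es c))

theorem pv_step_eq (t : PySem.Dict String (List String)) (log : List (String × String)) :
    infer_topology_step t log = match pvEdge? log with
      | some (c, e) => pvEdgeStep t c e
      | none => t := by
  unfold infer_topology_step pvEdge? pvEdgeStep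
  cases (PySem.Dict.ofList log).get? "caller" with
  | none => rfl
  | some c =>
    cases (PySem.Dict.ofList log).get? "callee" with
    | none => rfl
    | some e =>
      by_cases h : ¬c = "" ∧ ¬e = "" <;> simp [h]

theorem pv_fold_eq (logs : List (List (String × String))) (t : PySem.Dict String (List String)) :
    logs.foldl infer_topology_step t
      = (logs.filterMap pvEdge?).foldl (fun t p => pvEdgeStep t p.1 p.2) t := by
  induction logs generalizing t with
  | nil => rfl
  | cons log logs ih =>
    simp only [List.foldl_cons, List.filterMap_cons, pv_step_eq]
    cases h : pvEdge? log with
    | none => exact ih t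
    | some p => cases p; simp [ih]

theorem pv_dedup_append_singleton {α : Type} [DecidableEq α] (v : List α) (e : α) :
    PySem.List.dedup (v ++ [e]) = if e ∈ PySem.List.dedup v then PySem.List.dedup v else PySem.List.dedup v ++ [e] := by
  simp [PySem.List.dedup, PySem.Set.ofList, List.foldl_append, PySem.Set.add, PySem.Set.contains]

-- get?/contains of a dict whose items are keys.map (fun k => (k, g k))
theorem pv_get?_keyed (keys : List String) (g : String → List String) (c : String) :
    (PySem.Dict.mk (keys.map (fun k => (k, g k)))).get? c
      = if c ∈ keys then some (g c) else none := by
  induction keys with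
  | nil => rfl
  | cons k ks ih =>
    simp only [List.map_cons, PySem.Dict.get?_mk_cons, List.mem_cons]
    by_cases h : k = c
    · subst h; simp
    · simp only [beq_iff_eq, h, if_false]
      rw [ih]
      by_cases hc : c ∈ ks <;> simp [hc, Ne.symm h]

theorem pv_contains_keyed (keys : List String) (g : String → List String) (c : String) :
    (PySem.Dict.mk (keys.map (fun k => (k, g k)))).contains c = decide (c ∈ keys) := by
  rw [PySem.Dict.contains_eq_isSome_get?, pv_get?_keyed]
  by_cases h : c ∈ keys <;> simp [h]

theorem pv_filter_nil_of_not_mem (es : List (String × String)) (c : String)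
    (h : c ∉ es.map Prod.fst) : es.filter (fun p => p.1 == c) = [] := by
  rw [List.filter_eq_nil_iff]
  intro p hp
  simp only [beq_iff_eq]
  intro hpc
  exact h (List.mem_map.mpr ⟨p, hp, hpc⟩)

-- the heart: one pvEdgeStep on the dict mirrors appending one edge in pvSpecF
theorem pv_edgeStep_spec (es : List (String × String)) (c e : String) :
    (pvEdgeStep (PySem.Dict.mk (pvSpecF es)) c e).items = pvSpecF (es ++ [(c, e)]) := by
  have hkeys : pvSpecF (es ++ [(c, e)])
      = (PySem.List.dedup (es.map Prod.fst ++ [c])).map (fun k => (k, pvG (es ++ [(c, e)]) k)) := by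
    simp [pvSpecF]
  unfold pvEdgeStep
  rw [show (PySem.Dict.mk (pvSpecF es)) = PySem.Dict.mk ((PySem.List.dedup (es.map Prod.fst)).map (fun k => (k, pvG es k))) from rfl]
  by_cases hc : c ∈ PySem.List.dedup (es.map Prod.fst)
  case pos =>
    have hcm : c ∈ es.map Prod.fst := (PySem.List.mem_dedup _ _).mp hc
    rw [pv_contains_keyed]
    simp only [hc, decide_true, if_true]
    have hget : (PySem.Dict.mk ((PySem.List.dedup (es.map Prod.fst)).map (fun k => (k, pvG es k)))).getD c [] = pvG es c := by
      rw [PySem.Dict.getD_eq_get?_getD, pv_get?_keyed]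
      have hc' : c ∈ PySem.Set.ofList (es.map Prod.fst) := by
        simpa [PySem.List.dedup_eq_ofList] using hc
      simp [hc']
    rw [hget, hkeys, pv_dedup_append_singleton, if_pos hc]
    have hgnew : ∀ k ∈ PySem.List.dedup (es.map Prod.fst),
        pvG (es ++ [(c, e)]) k = if k = c then (if e ∈ pvG es c then pvG es c else pvG es c ++ [e]) else pvG es k := by
      intro k _
      unfold pvG
      rw [List.filter_append]
      by_cases hk : k = c
      · subst hk
        simp only [List.filter_cons, List.filter_nil, beq_self_eq_true, if_true,
          List.map_append, List.map_cons, List.map_nil]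
        rw [pv_dedup_append_singleton]
      · have : ((([(c, e)] : List (String × String))).filter (fun p => p.1 == k)) = [] := by
          simp [Ne.symm hk]
        simp [this, hk]
    by_cases he : e ∈ pvG es c
    case pos =>
      rw [if_pos he]
      apply List.map_congr_left
      intro k hk
      rw [hgnew k hk]
      by_cases hkc : k = c
      · subst hkc; simp [he]
      · simp [hkc]
    case neg =>
      rw [if_neg he]
      have hmod : (PySem.Dict.mk ((PySem.List.dedup (es.map Prod.fst)).map (fun k => (k, pvG es k)))).modify c [] (· ++ [e])
          = (PySem.Dict.mk ((PySem.List.dedup (es.map Prod.fst)).map (fun k => (k, pvG es k)))).insert c (pvG es c ++ [e]) := by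
        rw [PySem.Dict.modify, hget]
      rw [hmod]
      have hcont : (PySem.Dict.mk ((PySem.List.dedup (es.map Prod.fst)).map (fun k => (k, pvG es k)))).contains c = true := by
        rw [pv_contains_keyed]; exact decide_eq_true hc
      rw [PySem.Dict.items_insert_of_contains _ _ hcont]
      simp only [List.map_map]
      apply List.map_congr_left
      intro k hk
      rw [hgnew k hk]
      by_cases hkc : k = c
      · subst hkc; simp [he]
      · simp [Function.comp, hkc]
  case neg =>
    have hcm : c ∉ es.map Prod.fst := fun h => hc ((PySem.List.mem_dedup _ _).mpr h)
    have hcontf : (PySem.Dict.mk ((PySem.List.dedup (es.map Prod.fst)).map (fun k => (k, pvG es k)))).contains c = false := by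
      rw [pv_contains_keyed]; exact decide_eq_false hc
    rw [hcontf]
    simp only [Bool.false_eq_true, if_false]
    have hget0 : ((PySem.Dict.mk ((PySem.List.dedup (es.map Prod.fst)).map (fun k => (k, pvG es k)))).insert c []).getD c [] = ([] : List String) := by
      simp [PySem.Dict.getD_eq_get?_getD, PySem.Dict.get?_insert_self]
    rw [hget0]
    simp only [List.not_mem_nil, if_false]
    have hmod : ((PySem.Dict.mk ((PySem.List.dedup (es.map Prod.fst)).map (fun k => (k, pvG es k)))).insert c []).modify c [] (· ++ [e])
        = (PySem.Dict.mk ((PySem.List.dedup (es.map Prod.fst)).map (fun k => (k, pvG es k)))).insert c [e] := by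
      rw [PySem.Dict.modify, hget0]
      simp only [List.nil_append]
      rw [PySem.Dict.insert_insert_self]
    rw [hmod, PySem.Dict.items_insert_of_not_contains _ _ hcontf]
    rw [hkeys, pv_dedup_append_singleton, if_neg hc, List.map_append]
    congr 1
    · apply List.map_congr_left
      intro k hk
      have hkc : k ≠ c := fun h => hc (h ▸ hk)
      unfold pvG
      rw [List.filter_append]
      have : ((([(c, e)] : List (String × String))).filter (fun p => p.1 == k)) = [] := by
        simp [Ne.symm hkc]
      simp [this]
    · simp only [List.map_cons, List.map_nil]
      rw [show pvG (es ++ [(c, e)]) c = [e] from ?_]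
      unfold pvG
      rw [List.filter_append, pv_filter_nil_of_not_mem es c hcm]
      simp [PySem.List.dedup, PySem.Set.ofList, PySem.Set.add, PySem.Set.empty, PySem.Set.contains]

theorem pv_fold_spec (es : List (String × String)) :
    (es.foldl (fun t p => pvEdgeStep t p.1 p.2) PySem.Dict.empty).items = pvSpecF es := by
  induction es using List.reverseRecOn with
  | nil => rfl
  | append_singleton es p ih =>
    rw [List.foldl_append, List.foldl_cons, List.foldl_nil]
    have hd : es.foldl (fun t p => pvEdgeStep t p.1 p.2) PySem.Dict.empty = PySem.Dict.mk (pvSpecF es) :=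
      PySem.Dict.ext ih
    rw [hd]
    cases p with
    | mk c e => exact pv_edgeStep_spec es c e

-- ===== VERDICT =====
theorem infer_topology_spec : Claim_equal_infer_topology := by
  intro logs _
  unfold Spec_infer_topology infer_topology infer_topology_alt
  simp only [pv_fold_eq, pv_fold_spec, pvSpecF, pvG]
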